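-- pv_equiv track=rewrite | github.com/alfavarman/leetcode | weights.py | order_weight
-- ===== SOURCE A (Python) =====
-- def order_weight(strng):
--     tokens = strng.split(" ")
--     if len(tokens) == 0:
--         return ""
--
--     def sum_digits(strn: str) -> int:
--         result = 0
--         for i in strn:
--             result += int(i)
--         return result
--
--     tokens.sort()
--     sorted_tokens = sorted(tokens, key=sum_digits)
--     result = " ".join(sorted_tokens)
--     return result
-- ===== SOURCE B (Python) =====
-- def order_weight(strng):
--     def sum_digits(t):
--         total = 0
--         for ch in t:
--             total += int(ch)
--         return total
--
--     buckets = {}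
--     for tok in strng.split(" "):
--         buckets.setdefault(sum_digits(tok), []).append(tok)
--     out = []
--     for k in sorted(buckets):
--         out.extend(sorted(buckets[k]))
--     return " ".join(out)
-- ===== Notes on version B (the rewrite author's own statement) =====
-- stated objective: alternative
-- what changed: Replaces A's double stable sort (lexicographic sort of all tokens, then a second stable sort by digit sum) with a one-pass bucket index mapping digit-sum -> list of tokens, then walks the keys in ascending order sorting each (typically small) bucket lexicographically.
import Mathlib
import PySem

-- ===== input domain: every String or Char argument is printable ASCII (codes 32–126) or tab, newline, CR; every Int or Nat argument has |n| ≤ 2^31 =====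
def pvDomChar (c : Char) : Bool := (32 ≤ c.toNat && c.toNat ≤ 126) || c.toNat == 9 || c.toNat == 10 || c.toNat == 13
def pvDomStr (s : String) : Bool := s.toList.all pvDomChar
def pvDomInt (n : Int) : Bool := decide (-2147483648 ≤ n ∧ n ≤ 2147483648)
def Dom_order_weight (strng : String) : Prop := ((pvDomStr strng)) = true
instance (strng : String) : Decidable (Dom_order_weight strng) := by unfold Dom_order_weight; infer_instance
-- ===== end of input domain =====

-- B replaces A's double stable sort with a one-pass digit-sum -> bucket index walked in ascending
-- key order (each bucket sorted lexicographically); same cost, different algorithm (objective: alternative).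


-- ===== PORT A =====
-- sum_digits: 'result += int(i)' over the characters; int(i) is PySem.Int.ofStr? (a one-char string),
-- total under Pre_ (every character is a digit), raising inputs are excluded by Pre_ below.
def pvSumDigitsA (strn : String) : Int :=
  strn.toList.foldl (fun result i => result + (PySem.Int.ofStr? (String.ofList [i])).getD 0) 0

def order_weight (strng : String) : String :=
  let tokens := (PySem.Str.split? strng " ").getD []
  if PySem.List.len tokens == 0 then ""
  else
    let tokens := PySem.List.sorted tokens (fun t => t) false
    let sorted_tokens := PySem.List.sorted tokens pvSumDigitsA false
    PySem.Str.join " " sorted_tokens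

-- ===== PORT B =====
def pvSumDigitsB (t : String) : Int :=
  t.toList.foldl (fun total ch => total + (PySem.Int.ofStr? (String.ofList [ch])).getD 0) 0

def order_weight_alt (strng : String) : String :=
  let buckets := ((PySem.Str.split? strng " ").getD []).foldl
    (fun d tok => d.modify (pvSumDigitsB tok) [] (fun l => l ++ [tok])) PySem.Dict.empty
  let out := (PySem.List.sorted (PySem.Dict.keys buckets) (fun k => k) false).foldl
    (fun acc k => acc ++ PySem.List.sorted (PySem.Dict.getD buckets k []) (fun t => t) false) []
  PySem.Str.join " " out

-- ===== PRECONDITION & SPEC =====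
-- Pre_ excludes exactly the inputs on which A raises ValueError: int(ch) raises unless every
-- character of every token (i.e. every non-space character of strng) is a decimal digit.
def Pre_order_weight (strng : String) : Prop :=
  strng.toList.all (fun c => PySem.Chars.isdigit c || c == ' ') = true
instance (strng : String) : Decidable (Pre_order_weight strng) := by
  unfold Pre_order_weight; infer_instance
def pvWitness_order_weight : String := "2000 10003 1234000 44444444 9999 11 11 22 123"

def Spec_order_weight (strng : String) (out : String) : Prop := out = order_weight_alt strng
instance (strng : String) (out : String) : Decidable (Spec_order_weight strng out) := by
  unfold Spec_order_weight; infer_instance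

-- ===== CLAIM (what is proved, stated in full; the proofs are below) =====
def Claim_equal_order_weight : Prop := ∀ (strng : String), Dom_order_weight strng →
  Pre_order_weight strng → Spec_order_weight strng (order_weight strng)

-- ===== LEMMAS AND PROOFS =====

-- the stability order: strictly smaller weight, or equal weight and lexicographically ≤
def pvR (w : String → Int) (a b : String) : Prop := w a < w b ∨ (w a = w b ∧ a ≤ b)

theorem pvR_imp_le {w : String → Int} {a b : String} (h : pvR w a b) : w a ≤ w b := by
  rcases h with h | ⟨h, _⟩ <;> omega

theorem pv_insertBy_pairwise (w : String → Int) (x : String) (acc : List String)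
    (hp : acc.Pairwise (pvR w)) (hle : ∀ a ∈ acc, a ≤ x) :
    (PySem.List.insertBy (fun a b => decide (w a < w b)) x acc).Pairwise (pvR w) := by
  induction acc with
  | nil => simp [PySem.List.insertBy, pvR]
  | cons y ys ih =>
    rcases List.pairwise_cons.mp hp with ⟨hy, hys⟩
    by_cases hlt : w x < w y
    · simp only [PySem.List.insertBy, hlt, decide_true, if_true]
      refine List.pairwise_cons.mpr ⟨?_, hp⟩
      intro z hz
      rcases List.mem_cons.mp hz with rfl | hz
      · exact Or.inl hlt
      · exact Or.inl (lt_of_lt_of_le hlt (pvR_imp_le (hy z hz)))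
    · simp only [PySem.List.insertBy, hlt, decide_false]
      refine List.pairwise_cons.mpr ⟨?_, ih hys (fun a ha => hle a (List.mem_cons_of_mem y ha))⟩
      intro z hz
      rcases (PySem.List.mem_insertBy _ x z ys).mp hz with rfl | hz
      · rcases lt_or_eq_of_le (not_lt.mp hlt) with h | h
        · exact Or.inl h
        · exact Or.inr ⟨h, hle y List.mem_cons_self⟩
      · exact hy z hz

theorem pv_foldl_insertBy_pairwise (w : String → Int) :
    ∀ (xs acc : List String), xs.Pairwise (· ≤ ·) → acc.Pairwise (pvR w) →
      (∀ a ∈ acc, ∀ x ∈ xs, a ≤ x) →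
      (xs.foldl (fun acc x => PySem.List.insertBy (fun a b => decide (w a < w b)) x acc)
        acc).Pairwise (pvR w) := by
  intro xs
  induction xs with
  | nil => intro acc _ hacc _; simpa using hacc
  | cons x rest ih =>
    intro acc hxs hacc hcross
    rcases List.pairwise_cons.mp hxs with ⟨hx, hrest⟩
    simp only [List.foldl_cons]
    refine ih _ hrest (pv_insertBy_pairwise w x acc hacc
      (fun a ha => hcross a ha x List.mem_cons_self)) ?_
    intro a ha y hy
    rcases (PySem.List.mem_insertBy _ x a acc).mp ha with rfl | ha
    · exact hx y hy
    · exact hcross a ha y (List.mem_cons_of_mem x hy)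

-- stability: a stable sort by weight of a lexicographically sorted list is pairwise pvR
theorem pv_sorted_stable (w : String → Int) (xs : List String) (h : xs.Pairwise (· ≤ ·)) :
    (PySem.List.sorted xs w false).Pairwise (pvR w) := by
  rw [PySem.List.sorted_eq_foldl_insertBy]
  exact pv_foldl_insertBy_pairwise w xs [] h (by simp) (by simp)

-- the buckets concatenation is a permutation of the tokens
theorem pv_flatMap_buckets_perm (w : String → Int) :
    ∀ (ks : List Int) (toks : List String), ks.Nodup → (∀ t ∈ toks, w t ∈ ks) →
      (ks.flatMap (fun k =>
        PySem.List.sorted (toks.filter (fun t => w t == k)) (fun x => x) false)).Perm toks := by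
  intro ks
  induction ks with
  | nil =>
    intro toks _ hmem
    have : toks = [] := List.eq_nil_iff_forall_not_mem.mpr (fun t ht => by simpa using hmem t ht)
    simp [this]
  | cons k ks ih =>
    intro toks hnd hmem
    rcases List.nodup_cons.mp hnd with ⟨hk, hnd'⟩
    have hrw : ∀ j ∈ ks,
        PySem.List.sorted (toks.filter (fun t => w t == j)) (fun x => x) false
          = PySem.List.sorted ((toks.filter (fun t => !(w t == k))).filter
              (fun t => w t == j)) (fun x => x) false := by
      intro j hj
      rw [List.filter_filter]
      congr 1
      refine (List.filter_congr ?_).symm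
      intro t _
      have hjk : j ≠ k := fun h => hk (h ▸ hj)
      by_cases hwt : w t = j
      · simp [hwt, hjk]
      · simp [hwt]
    have hflat : ks.flatMap (fun j =>
        PySem.List.sorted (toks.filter (fun t => w t == j)) (fun x => x) false)
        = ks.flatMap (fun j =>
        PySem.List.sorted ((toks.filter (fun t => !(w t == k))).filter
          (fun t => w t == j)) (fun x => x) false) := by
      simp only [List.flatMap]
      exact congrArg List.flatten (List.map_congr_left hrw)
    have hperm2 : (ks.flatMap (fun j =>
        PySem.List.sorted ((toks.filter (fun t => !(w t == k))).filter
          (fun t => w t == j)) (fun x => x) false)).Perm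
          (toks.filter (fun t => !(w t == k))) := by
      refine ih _ hnd' ?_
      intro t ht
      rcases List.mem_filter.mp ht with ⟨ht', hne⟩
      have := hmem t ht'
      rcases List.mem_cons.mp this with h | h
      · exact absurd (by simpa using h) (by simpa using hne)
      · exact h
    rw [List.flatMap_cons, hflat]
    exact ((PySem.List.sorted_perm _ _ _).append hperm2).trans
      (List.filter_append_perm (fun t => w t == k) toks)

-- the buckets concatenation is pairwise pvR
theorem pv_flatMap_buckets_pairwise (w : String → Int) (ks : List Int) (toks : List String)
    (hks : ks.Pairwise (· < ·)) :
    (ks.flatMap (fun k =>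
      PySem.List.sorted (toks.filter (fun t => w t == k)) (fun x => x) false)).Pairwise
      (pvR w) := by
  rw [List.flatMap]
  rw [List.pairwise_flatten]
  constructor
  · intro l hl
    rcases List.mem_map.mp hl with ⟨k, _, rfl⟩
    have hpw := PySem.List.sorted_pairwise (toks.filter (fun t => w t == k)) (fun x => x)
    refine hpw.imp_of_mem ?_
    intro a b ha hb hab
    have hwa : w a = k := by
      have := (PySem.List.mem_sorted _ _ _ a).mp ha
      simpa using (List.mem_filter.mp this).2
    have hwb : w b = k := by
      have := (PySem.List.mem_sorted _ _ _ b).mp hb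
      simpa using (List.mem_filter.mp this).2
    exact Or.inr ⟨hwa.trans hwb.symm, hab⟩
  · rw [List.pairwise_map]
    refine hks.imp_of_mem ?_
    intro k₁ k₂ _ _ hlt x hx y hy
    have hwx : w x = k₁ := by
      have := (PySem.List.mem_sorted _ _ _ x).mp hx
      simpa using (List.mem_filter.mp this).2
    have hwy : w y = k₂ := by
      have := (PySem.List.mem_sorted _ _ _ y).mp hy
      simpa using (List.mem_filter.mp this).2
    exact Or.inl (by rw [hwx, hwy]; exact hlt)

-- main list-level fact: A's double stable sort equals B's ordered-buckets concatenation
theorem pv_main (w : String → Int) (toks : List String) :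
    PySem.List.sorted (PySem.List.sorted toks (fun t => t) false) w false
      = (PySem.List.sorted (PySem.Set.ofList (toks.map w)) (fun k => k) false).flatMap
          (fun k => PySem.List.sorted (toks.filter (fun t => w t == k)) (fun x => x) false) := by
  have hks_lt := PySem.List.sorted_ofList_pairwise_lt (toks.map w)
  have hks_nd : (PySem.List.sorted (PySem.Set.ofList (toks.map w)) (fun k => k) false).Nodup :=
    hks_lt.nodup
  refine PySem.List.eq_of_perm_of_pairwise_le_of_injective
    (κ := Lex (Int × String)) (fun t => toLex (w t, t)) ?_ ?_ ?_ ?_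
  · intro a b h
    have := congrArg (fun p => (ofLex p).2) h
    simpa using this
  · refine ((PySem.List.sorted_perm _ _ _).trans (PySem.List.sorted_perm _ _ _)).trans ?_
    refine (pv_flatMap_buckets_perm w _ toks hks_nd ?_).symm
    intro t ht
    rw [PySem.List.mem_sorted, PySem.Set.mem_ofList]
    exact List.mem_map_of_mem ht
  · have h₁ : (PySem.List.sorted toks (fun t => t) false).Pairwise (· ≤ ·) :=
      PySem.List.sorted_pairwise toks (fun t => t)
    refine (pv_sorted_stable w _ h₁).imp ?_
    intro a b hab
    rw [Prod.Lex.toLex_le_toLex]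
    exact hab
  · refine (pv_flatMap_buckets_pairwise w _ toks hks_lt).imp ?_
    intro a b hab
    rw [Prod.Lex.toLex_le_toLex]
    exact hab

-- B's dict fold, read back: every bucket holds exactly its tokens, keys are the distinct weights
theorem pv_buckets_getD (toks : List String) (k : Int) :
    (toks.foldl (fun d tok => d.modify (pvSumDigitsB tok) [] (fun l => l ++ [tok]))
      PySem.Dict.empty).getD k []
      = toks.filter (fun t => pvSumDigitsB t == k) := by
  have hmap : toks.foldl (fun d tok => d.modify (pvSumDigitsB tok) [] (fun l => l ++ [tok]))
      (PySem.Dict.empty : PySem.Dict Int (List String))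
      = (toks.map (fun t => (pvSumDigitsB t, t))).foldl
          (fun d p => d.modify p.1 [] (fun l => l ++ [p.2])) PySem.Dict.empty := by
    rw [List.foldl_map]
  rw [hmap, PySem.Dict.getD_foldl_modify_append]
  simp [List.filter_map, List.map_map, Function.comp_def]

theorem pv_buckets_keys (toks : List String) :
    (toks.foldl (fun d tok => d.modify (pvSumDigitsB tok) [] (fun l => l ++ [tok]))
      (PySem.Dict.empty : PySem.Dict Int (List String))).keys
      = PySem.Set.ofList (toks.map pvSumDigitsB) := by
  rw [PySem.Dict.keys_foldl_modify_key toks pvSumDigitsB [] (fun _ tok l => l ++ [tok])]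
  simp [PySem.Set.ofList_eq_foldl, PySem.Set.update]

-- ===== VERDICT (by name: the statement is the Claim_ definition above) =====
theorem order_weight_spec : Claim_equal_order_weight := by
  intro strng _ _
  obtain ⟨toks, htoks⟩ : ∃ t, (PySem.Str.split? strng " ").getD [] = t := ⟨_, rfl⟩
  show order_weight strng = order_weight_alt strng
  simp only [order_weight, order_weight_alt, htoks]
  by_cases hnil : toks = []
  · subst hnil; rfl
  · have hlen : (PySem.List.len toks == 0) = false := by
      simp [PySem.List.len_eq, List.length_eq_zero_iff, hnil]
    simp only [hlen, Bool.false_eq_true, if_false]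
    refine congrArg (PySem.Str.join " ") ?_
    rw [pv_buckets_keys, PySem.List.foldl_append_eq_flatMap, List.nil_append]
    have hg : (fun k => PySem.List.sorted
        ((toks.foldl (fun d tok => d.modify (pvSumDigitsB tok) [] (fun l => l ++ [tok]))
          PySem.Dict.empty).getD k []) (fun t => t) false)
        = fun k => PySem.List.sorted (toks.filter (fun t => pvSumDigitsB t == k))
            (fun t => t) false := by
      funext k; rw [pv_buckets_getD]
    rw [hg]
    have hAB : pvSumDigitsA = pvSumDigitsB := rfl
    rw [hAB]
    exact pv_main pvSumDigitsB toks
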